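-- pv_equiv track=rewrite | github.com/ggwlab/NTVE | refactoring_roadmap_figure2_shared.py | get_sample_pairs
-- ===== SOURCE A (Python) =====
-- from collections import defaultdict
--
-- def get_sample_pairs(source_samples: list[str], target_samples: list[str], sample_map: dict) -> list[tuple[str, str]]:
--     source_by_replicate = defaultdict(list)
--     target_by_replicate = defaultdict(list)
--     for source_col in source_samples:
--         replicate = sample_map.get(source_col, {}).get("Replicate")
--         if replicate is not None:
--             source_by_replicate[replicate].append(source_col)
--     for target_col in target_samples:
--         replicate = sample_map.get(target_col, {}).get("Replicate")
--         if replicate is not None: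
--             target_by_replicate[replicate].append(target_col)
--     sample_pairs = []
--     for replicate in sorted(set(source_by_replicate) & set(target_by_replicate)):
--         for source_col in source_by_replicate[replicate]:
--             for target_col in target_by_replicate[replicate]:
--                 sample_pairs.append((source_col, target_col))
--     return sample_pairs
-- ===== SOURCE B (Python) =====
-- def get_sample_pairs(source_samples: list[str], target_samples: list[str], sample_map: dict) -> list[tuple[str, str]]:
--     def rep(col):
--         return sample_map.get(col, {}).get("Replicate")
--     source_reps = {r for r in map(rep, source_samples) if r is not None}
--     target_reps = {r for r in map(rep, target_samples) if r is not None}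
--     return [(s, t)
--             for r in sorted(source_reps & target_reps)
--             for s in source_samples if rep(s) == r
--             for t in target_samples if rep(t) == r]
-- ===== Notes on version B (the rewrite author's own statement) =====
-- stated objective: simpler
-- what changed: Replaces the two pre-built replicate->samples defaultdict indexes with two set comprehensions of shared replicates plus a nested comprehension that re-scans the original lists per shared replicate, removing the grouping data structures entirely.
import Mathlib
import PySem

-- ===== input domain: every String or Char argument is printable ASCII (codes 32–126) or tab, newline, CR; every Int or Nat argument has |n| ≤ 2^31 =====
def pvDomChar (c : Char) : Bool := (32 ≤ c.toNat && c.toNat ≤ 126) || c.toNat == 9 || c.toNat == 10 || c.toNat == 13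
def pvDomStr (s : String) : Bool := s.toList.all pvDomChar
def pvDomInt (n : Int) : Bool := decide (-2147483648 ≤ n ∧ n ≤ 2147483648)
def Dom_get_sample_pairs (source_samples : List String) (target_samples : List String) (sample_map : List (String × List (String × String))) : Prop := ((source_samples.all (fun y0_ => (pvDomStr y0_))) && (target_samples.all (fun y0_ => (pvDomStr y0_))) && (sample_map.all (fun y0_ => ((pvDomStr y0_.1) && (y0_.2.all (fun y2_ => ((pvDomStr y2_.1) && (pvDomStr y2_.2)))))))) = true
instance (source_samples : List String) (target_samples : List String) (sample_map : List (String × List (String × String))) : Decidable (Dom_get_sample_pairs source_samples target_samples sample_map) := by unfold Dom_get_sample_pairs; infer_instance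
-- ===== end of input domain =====

-- B replaces A's two pre-built replicate->samples dict indexes with set comprehensions of
-- shared replicates plus a per-replicate rescan of the raw lists (objective: simpler).

-- ===== PORT A =====
-- shared lookup helper: sample_map.get(col, {}).get("Replicate")
def pvGetRep (sample_map : List (String × List (String × String))) (col : String) : Option String :=
  match (PySem.Dict.mk sample_map).get? col with
  | none => none
  | some inner => (PySem.Dict.mk inner).get? "Replicate"

def get_sample_pairs (source_samples : List String) (target_samples : List String) (sample_map : List (String × List (String × String))) : List (String × String) :=
  let source_by_replicate : PySem.Dict String (List String) :=
    source_samples.foldl (fun d c =>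
      match pvGetRep sample_map c with
      | some r => d.modify r [] (· ++ [c])
      | none => d) PySem.Dict.empty
  let target_by_replicate : PySem.Dict String (List String) :=
    target_samples.foldl (fun d c =>
      match pvGetRep sample_map c with
      | some r => d.modify r [] (· ++ [c])
      | none => d) PySem.Dict.empty
  let shared := PySem.List.sorted
    (PySem.Set.inter (PySem.Set.ofList source_by_replicate.keys) target_by_replicate.keys)
    (fun x => x) false
  shared.foldl (fun acc r =>
    (source_by_replicate.getD r []).foldl (fun acc s =>
      (target_by_replicate.getD r []).foldl (fun acc t => acc ++ [(s, t)]) acc) acc) []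

-- ===== PORT B =====
def get_sample_pairs_alt (source_samples : List String) (target_samples : List String) (sample_map : List (String × List (String × String))) : List (String × String) :=
  let source_reps := PySem.Set.ofList (source_samples.filterMap (pvGetRep sample_map))
  let target_reps := PySem.Set.ofList (target_samples.filterMap (pvGetRep sample_map))
  (PySem.List.sorted (PySem.Set.inter source_reps target_reps) (fun x => x) false).flatMap
    (fun r =>
      (source_samples.filter (fun s => pvGetRep sample_map s == some r)).flatMap
        (fun s =>
          (target_samples.filter (fun t => pvGetRep sample_map t == some r)).map
            (fun t => (s, t))))

-- ===== PRECONDITION & SPEC =====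
def Spec_get_sample_pairs (source_samples : List String) (target_samples : List String) (sample_map : List (String × List (String × String))) (out : List (String × String)) : Prop := out = get_sample_pairs_alt source_samples target_samples sample_map
instance (source_samples : List String) (target_samples : List String) (sample_map : List (String × List (String × String))) (out : List (String × String)) : Decidable (Spec_get_sample_pairs source_samples target_samples sample_map out) := by unfold Spec_get_sample_pairs; infer_instance

-- ===== CLAIM (what is proved, stated in full; the proofs are below) =====
def Claim_equal_get_sample_pairs : Prop := ∀ (source_samples : List String) (target_samples : List String) (sample_map : List (String × List (String × String))), Dom_get_sample_pairs source_samples target_samples sample_map → Spec_get_sample_pairs source_samples target_samples sample_map (get_sample_pairs source_samples target_samples sample_map)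

-- ===== LEMMAS AND PROOFS =====

-- A's grouping loop is the canonical modify-append fold over the (replicate, col) pairs
theorem pv_build_eq (sample_map : List (String × List (String × String)))
    (cols : List String) (d : PySem.Dict String (List String)) :
    cols.foldl (fun d c =>
      match pvGetRep sample_map c with
      | some r => d.modify r [] (· ++ [c])
      | none => d) d
    = (cols.filterMap (fun c => (pvGetRep sample_map c).map (fun r => (r, c)))).foldl
        (fun d p => d.modify p.1 [] (· ++ [p.2])) d := by
  induction cols generalizing d with
  | nil => rfl
  | cons c cs ih =>
    simp only [List.foldl_cons, List.filterMap_cons]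
    cases h : pvGetRep sample_map c with
    | none => simp [ih]
    | some r => simp [ih]

theorem pv_pairs_filter (sample_map : List (String × List (String × String)))
    (cols : List String) (r : String) :
    ((cols.filterMap (fun c => (pvGetRep sample_map c).map (fun rr => (rr, c)))).filter
        (fun p => p.1 == r)).map (·.2)
    = cols.filter (fun c => pvGetRep sample_map c == some r) := by
  induction cols with
  | nil => rfl
  | cons c cs ih =>
    simp only [List.filterMap_cons]
    cases h : pvGetRep sample_map c with
    | none => simpa [List.filter_cons, h] using ih
    | some rr =>
      by_cases hrr : rr = r
      · subst hrr; simp [h, ih]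
      · simp [h, hrr, ih]

theorem pv_pairs_keys (sample_map : List (String × List (String × String)))
    (cols : List String) :
    (cols.filterMap (fun c => (pvGetRep sample_map c).map (fun rr => (rr, c)))).map (·.1)
    = cols.filterMap (pvGetRep sample_map) := by
  induction cols with
  | nil => rfl
  | cons c cs ih =>
    simp only [List.filterMap_cons]
    cases h : pvGetRep sample_map c <;> simp [ih]

theorem pv_getD_build (sample_map : List (String × List (String × String)))
    (cols : List String) (r : String) :
    (cols.foldl (fun d c =>
      match pvGetRep sample_map c with
      | some r => d.modify r [] (· ++ [c])
      | none => d) PySem.Dict.empty).getD r []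
    = cols.filter (fun c => pvGetRep sample_map c == some r) := by
  rw [pv_build_eq, PySem.Dict.getD_foldl_modify_append, pv_pairs_filter]
  rfl

theorem pv_keys_build (sample_map : List (String × List (String × String)))
    (cols : List String) :
    (cols.foldl (fun d c =>
      match pvGetRep sample_map c with
      | some r => d.modify r [] (· ++ [c])
      | none => d) PySem.Dict.empty).keys
    = PySem.Set.ofList (cols.filterMap (pvGetRep sample_map)) := by
  rw [pv_build_eq]
  have := PySem.Dict.keys_foldl_modify_key
    (l := cols.filterMap (fun c => (pvGetRep sample_map c).map (fun rr => (rr, c))))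
    (key := fun p => p.1) (f := fun d p => (· ++ [p.2])) (d := PySem.Dict.empty) (d0 := [])
  rw [this]
  rw [show ((cols.filterMap (fun c => (pvGetRep sample_map c).map (fun rr => (rr, c)))).map (fun p => p.1)) = cols.filterMap (pvGetRep sample_map) from pv_pairs_keys sample_map cols]
  simpa using PySem.Set.update_empty (cols.filterMap (pvGetRep sample_map))

-- A's triple append loop over the shared replicates is the nested flatMap
theorem pv_triple (F G : String → List String) (shared : List String)
    (acc : List (String × String)) :
    shared.foldl (fun acc r =>
      (F r).foldl (fun acc s =>
        (G r).foldl (fun acc t => acc ++ [(s, t)]) acc) acc) acc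
    = acc ++ shared.flatMap (fun r => (F r).flatMap (fun s => (G r).map (fun t => (s, t)))) := by
  induction shared generalizing acc with
  | nil => simp
  | cons r rs ih =>
    simp only [List.foldl_cons, List.flatMap_cons]
    have h1 : ∀ acc : List (String × String),
        (F r).foldl (fun acc s =>
          (G r).foldl (fun acc t => acc ++ [(s, t)]) acc) acc
        = acc ++ (F r).flatMap (fun s => (G r).map (fun t => (s, t))) := by
      intro acc
      simp only [PySem.List.foldl_append_singleton_eq_map]
      rw [PySem.List.foldl_append_eq_flatMap]
    rw [h1, ih, List.append_assoc]

theorem get_sample_pairs_spec : Claim_equal_get_sample_pairs := by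
  intro src tgt smap _
  unfold Spec_get_sample_pairs get_sample_pairs get_sample_pairs_alt
  simp only [pv_keys_build, pv_getD_build, PySem.Set.ofList_ofList]
  rw [pv_triple]
  simp
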